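-- pv_equiv track=rewrite | github.com/jhandross/PQ-Excel_BI_Challenges | Excel_Challenge_779 - Linked_in_Block_Shift.py | one_set_by_values
-- ===== SOURCE A (Python) =====
-- def rotate_right(lst, k):
--     n = len(lst)
--     if n == 0:
--         return lst[:]
--     k %= n
--     return lst[-k:] + lst[:-k] if k else lst[:]
--
-- def rotate_down_inplace(mat, col, k):
--     r = len(mat)
--     if r == 0:
--         return
--     k %= r
--     if k == 0:
--         return
--     col_vals = [mat[i][col] for i in range(r)]
--     new_vals = col_vals[-k:] + col_vals[:-k]
--     for i in range(r):
--         mat[i][col] = new_vals[i]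
--
-- def one_set_by_values(mat, row_shifts, col_shifts):
--     R = len(mat)
--     C = len(mat[0]) if R else 0
--     out = [row[:] for row in mat]
--
--     # Row right-rotations
--     for r in range(R):
--         k = row_shifts[r] % C if C else 0
--         out[r] = rotate_right(out[r], k)
--
--     # Column down-rotations
--     for c in range(C):
--         k = col_shifts[c] % R if R else 0
--         rotate_down_inplace(out, c, k)
--
--     return out
-- ===== SOURCE B (Python) =====
-- def one_set_by_values(mat, row_shifts, col_shifts):
--     R = len(mat)
--     C = len(mat[0]) if R else 0
--     out = []
--     for i in range(R):
--         row = []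
--         for j in range(C):
--             p = (i - col_shifts[j]) % R
--             row.append(mat[p][(j - row_shifts[p]) % C])
--         out.append(row)
--     return out
-- ===== Notes on version B (the rewrite author's own statement) =====
-- stated objective: simpler
-- what changed: Replaces the two sequential rotation passes (per-row right rotations by slicing plus in-place per-column down rotations) with a single R x C double loop that reads each output entry directly from the input via a composed inverse-index formula, with no intermediate matrix and no mutation.
-- outside the precondition, e.g. on one_set_by_values([[1, 2], [3, 4, 5]], [1, 1], [0, 0]): A returns [[2, 1], [5, 3, 4]], B returns [[2, 1], [4, 3]]; on one_set_by_values([[1, 2], [3]], [0, 0], [0, 0]): A returns [[1, 2], [3]], B raises IndexError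
import Mathlib
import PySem

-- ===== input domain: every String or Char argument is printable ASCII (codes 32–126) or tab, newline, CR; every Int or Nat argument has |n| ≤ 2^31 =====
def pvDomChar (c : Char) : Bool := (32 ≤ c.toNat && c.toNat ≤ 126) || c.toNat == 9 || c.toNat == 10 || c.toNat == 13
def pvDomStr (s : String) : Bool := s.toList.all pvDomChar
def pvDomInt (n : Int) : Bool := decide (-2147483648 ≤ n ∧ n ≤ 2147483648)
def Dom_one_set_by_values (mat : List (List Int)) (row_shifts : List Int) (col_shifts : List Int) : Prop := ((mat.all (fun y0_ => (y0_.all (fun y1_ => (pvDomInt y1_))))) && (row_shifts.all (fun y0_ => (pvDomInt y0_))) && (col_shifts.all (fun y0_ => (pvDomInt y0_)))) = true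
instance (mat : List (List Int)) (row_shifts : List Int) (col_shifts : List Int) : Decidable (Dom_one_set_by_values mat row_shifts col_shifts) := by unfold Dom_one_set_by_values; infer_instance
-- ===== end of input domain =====

-- B replaces A's two sequential rotation passes with a single pass that fills each output
-- cell directly through a composed inverse-index formula (objective: simpler, same cost).


-- ===== PORT A =====
def pyRotateRight (lst : List Int) (k : Int) : List Int :=
  let n : Int := (lst.length : Int)
  if n = 0 then lst
  else
    let k2 := k % n
    if k2 ≠ 0 then PySem.List.slice lst (some (-k2)) none ++ PySem.List.slice lst none (some (-k2))
    else lst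

def pyRotateDownInplace (mat : List (List Int)) (col : Nat) (k : Int) : List (List Int) :=
  let r := mat.length
  if r = 0 then mat
  else
    let k2 := k % (r : Int)
    if k2 = 0 then mat
    else
      let colVals := (List.range r).map (fun i => (mat.getD i []).getD col 0)
      let newVals := PySem.List.slice colVals (some (-k2)) none ++ PySem.List.slice colVals none (some (-k2))
      mat.mapIdx (fun i row => row.set col (newVals.getD i 0))

def one_set_by_values (mat : List (List Int)) (row_shifts : List Int) (col_shifts : List Int) : List (List Int) :=
  let R := mat.length
  let C := if R = 0 then 0 else (mat.headD []).length
  let out0 := mat.map (fun row => row)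
  let out1 := (List.range R).foldl (fun out r =>
      let k : Int := if C ≠ 0 then (row_shifts.getD r 0) % (C : Int) else 0
      out.set r (pyRotateRight (out.getD r []) k)) out0
  (List.range C).foldl (fun out c =>
      let k : Int := if R ≠ 0 then (col_shifts.getD c 0) % (R : Int) else 0
      pyRotateDownInplace out c k) out1

-- ===== PORT B =====
def one_set_by_values_alt (mat : List (List Int)) (row_shifts : List Int) (col_shifts : List Int) : List (List Int) :=
  let R := mat.length
  let C := if R = 0 then 0 else (mat.headD []).length
  (List.range R).map (fun (i : Nat) =>
    (List.range C).map (fun (j : Nat) =>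
      let p : Nat := (((i : Int) - col_shifts.getD j 0) % (R : Int)).toNat
      (mat.getD p []).getD ((((j : Int) - row_shifts.getD p 0) % (C : Int)).toNat) 0))

-- ===== PRECONDITION & SPEC =====
-- Pre_ excludes non-rectangular matrices (on ragged inputs A's per-row rotation uses each
-- row's own length while C comes from row 0, an artefact of A's two-pass implementation)
-- and shift lists too short for the touched rows/columns (there A raises IndexError).
def Pre_one_set_by_values (mat : List (List Int)) (row_shifts : List Int) (col_shifts : List Int) : Prop :=
  (∀ row ∈ mat, row.length = (mat.headD []).length) ∧
  ((mat.headD []).length ≠ 0 → mat.length ≤ row_shifts.length ∧ (mat.headD []).length ≤ col_shifts.length)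
instance (mat : List (List Int)) (row_shifts : List Int) (col_shifts : List Int) : Decidable (Pre_one_set_by_values mat row_shifts col_shifts) := by unfold Pre_one_set_by_values; infer_instance

def pvWitness_one_set_by_values : List (List Int) × List Int × List Int := ([[1, 2], [3, 4]], [1, 0], [0, 1])

def Spec_one_set_by_values (mat : List (List Int)) (row_shifts : List Int) (col_shifts : List Int) (out : List (List Int)) : Prop := out = one_set_by_values_alt mat row_shifts col_shifts
instance (mat : List (List Int)) (row_shifts : List Int) (col_shifts : List Int) (out : List (List Int)) : Decidable (Spec_one_set_by_values mat row_shifts col_shifts out) := by unfold Spec_one_set_by_values; infer_instance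

-- ===== CLAIM (what is proved, stated in full; the proofs are below) =====
def Claim_equal_one_set_by_values : Prop := ∀ (mat : List (List Int)) (row_shifts : List Int) (col_shifts : List Int), Dom_one_set_by_values mat row_shifts col_shifts → Pre_one_set_by_values mat row_shifts col_shifts → Spec_one_set_by_values mat row_shifts col_shifts (one_set_by_values mat row_shifts col_shifts)

-- ===== LEMMAS AND PROOFS =====

def entM (m : List (List Int)) (i j : Nat) : Int := (m.getD i []).getD j 0

theorem pyRotateRight_eq (lst : List Int) (k : Int) (h0 : lst ≠ []) :
    pyRotateRight lst k = lst.drop (lst.length - (k % (lst.length : Int)).toNat)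
      ++ lst.take (lst.length - (k % (lst.length : Int)).toNat) := by
  have hlen : lst.length ≠ 0 := fun h => h0 (List.eq_nil_of_length_eq_zero h)
  have hlpos : 0 < lst.length := Nat.pos_of_ne_zero hlen
  have hnn : 0 ≤ k % (lst.length : Int) := Int.emod_nonneg k (by exact_mod_cast hlen)
  have hlt : k % (lst.length : Int) < (lst.length : Int) := Int.emod_lt_of_pos k (by exact_mod_cast hlpos)
  unfold pyRotateRight
  simp only []
  rw [if_neg (by exact_mod_cast hlen)]
  by_cases hk : k % (lst.length : Int) = 0
  · rw [if_neg (by simp [hk])]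
    simp [hk, List.take_of_length_le]
  · rw [if_pos (by simp [hk])]
    have ht : 0 < (k % (lst.length : Int)).toNat := by omega
    have hcast : -(k % (lst.length : Int)) = -(((k % (lst.length : Int)).toNat : Int)) := by omega
    rw [hcast, PySem.List.slice_from_neg_natCast _ _ ht, PySem.List.slice_to_neg_natCast _ _ ht]

theorem pyRotateRight_length (lst : List Int) (k : Int) : (pyRotateRight lst k).length = lst.length := by
  by_cases h0 : lst = []
  · subst h0; rfl
  · rw [pyRotateRight_eq lst k h0]; simp

theorem pyRotateRight_getD (lst : List Int) (k : Int) (j : Nat)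
    (h0 : lst ≠ []) (hj : j < lst.length) :
    (pyRotateRight lst k).getD j 0 = lst.getD ((((j : Int) - k) % (lst.length : Int)).toNat) 0 := by
  have hlen : lst.length ≠ 0 := fun h => h0 (List.eq_nil_of_length_eq_zero h)
  have hlpos : 0 < lst.length := Nat.pos_of_ne_zero hlen
  have hn0 : (lst.length : Int) ≠ 0 := by exact_mod_cast hlen
  have hnn : 0 ≤ k % (lst.length : Int) := Int.emod_nonneg k hn0
  have hlt : k % (lst.length : Int) < (lst.length : Int) := Int.emod_lt_of_pos k (by exact_mod_cast hlpos)
  set n := lst.length with hn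
  set t := (k % (n : Int)).toNat with htdef
  have ht : (t : Int) = k % (n : Int) := by omega
  have htn : t < n := by omega
  have hred : ((j : Int) - k) % (n : Int) = ((j : Int) - t) % (n : Int) := by
    rw [ht]
    conv_lhs => rw [Int.sub_emod]
    conv_rhs => rw [Int.sub_emod, Int.emod_emod_of_dvd k dvd_rfl]
  have hdroplen : (lst.drop (n - t)).length = t := by simp [hn]; omega
  rw [pyRotateRight_eq lst k h0, hred, ← htdef, ← hn]
  by_cases hjt : j < t
  · have hidx : (((j : Int) - t) % (n : Int)).toNat = n - t + j := by
      have h1 : ((j : Int) - t) % (n : Int) = ((j : Int) - t + n) % (n : Int) := by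
        rw [show (j : Int) - t + (n:Int) = (j : Int) - t + n * 1 by ring, Int.add_mul_emod_self_left]
      have h2 : ((j : Int) - t + n) % (n : Int) = (j : Int) - t + n :=
        Int.emod_eq_of_lt (by omega) (by omega)
      omega
    rw [hidx, List.getD_append _ _ _ _ (by omega),
        List.getD_eq_getElem _ _ (by omega), List.getD_eq_getElem _ _ (by omega),
        List.getElem_drop]
  · have hidx : (((j : Int) - t) % (n : Int)).toNat = j - t := by
      have h2 : ((j : Int) - t) % (n : Int) = (j : Int) - t :=
        Int.emod_eq_of_lt (by omega) (by omega)
      omega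
    rw [hidx, List.getD_append_right _ _ _ _ (by omega), hdroplen,
        List.getD_eq_getElem _ _ (by simp [hn]; omega), List.getD_eq_getElem _ _ (by omega),
        List.getElem_take]

theorem pyRotateDown_length (m : List (List Int)) (col : Nat) (k : Int) :
    (pyRotateDownInplace m col k).length = m.length := by
  simp only [pyRotateDownInplace]
  split_ifs <;> simp

theorem pyRotateDown_rowlen (m : List (List Int)) (col : Nat) (k : Int) (i : Nat) :
    ((pyRotateDownInplace m col k).getD i []).length = (m.getD i []).length := by
  simp only [pyRotateDownInplace]
  split_ifs with h1 h2
  · rfl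
  · rfl
  · by_cases hi : i < m.length
    · rw [List.getD_eq_getElem _ _ (by simp [hi]), List.getD_eq_getElem _ _ hi, List.getElem_mapIdx]
      simp
    · rw [List.getD_eq_default _ _ (by simp; omega), List.getD_eq_default _ _ (by omega)]

theorem newVals_eq_rot (m : List (List Int)) (col : Nat) (k : Int) (h0 : m.length ≠ 0) (hk : k % (m.length : Int) ≠ 0) :
    PySem.List.slice ((List.range m.length).map (fun i => (m.getD i []).getD col 0)) (some (-(k % (m.length : Int)))) none
      ++ PySem.List.slice ((List.range m.length).map (fun i => (m.getD i []).getD col 0)) none (some (-(k % (m.length : Int))))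
    = pyRotateRight ((List.range m.length).map (fun i => (m.getD i []).getD col 0)) k := by
  unfold pyRotateRight
  have hcv : ((List.range m.length).map (fun i => (m.getD i []).getD col 0)).length = m.length := by simp
  rw [hcv]
  rw [if_neg (by exact_mod_cast h0), if_pos (by exact hk)]

theorem pyRotateDown_ent (m : List (List Int)) (col : Nat) (k : Int) {C : Nat}
    (hrect : ∀ row ∈ m, row.length = C) (hcol : col < C)
    (i j : Nat) (hi : i < m.length) (hj : j < C) :
    entM (pyRotateDownInplace m col k) i j =
      if j = col then entM m ((((i : Int) - k) % (m.length : Int)).toNat) col else entM m i j := by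
  have h0 : m.length ≠ 0 := by omega
  have hn0 : (m.length : Int) ≠ 0 := by exact_mod_cast h0
  have hrowi : (m[i]).length = C := hrect _ (List.getElem_mem hi)
  simp only [pyRotateDownInplace]
  rw [if_neg h0]
  by_cases hk : k % (m.length : Int) = 0
  · rw [if_pos hk]
    have hmod : (((i : Int) - k) % (m.length : Int)).toNat = i := by
      have hs : ((i : Int) - k) % (m.length : Int) = ((i : Int) % m.length - k % m.length) % m.length := Int.sub_emod _ _ _
      have h2 : ((i : Int)) % (m.length : Int) = (i : Int) :=
        Int.emod_eq_of_lt (by omega) (by exact_mod_cast hi)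
      have h3 : ((i : Int) - k) % (m.length : Int) = (i : Int) := by
        rw [hs, hk, h2, sub_zero, h2]
      omega
    rw [hmod]
    split_ifs with hjc
    · subst hjc; rfl
    · rfl
  · rw [if_neg hk]
    rw [newVals_eq_rot m col k h0 hk]
    set colVals := (List.range m.length).map (fun i => (m.getD i []).getD col 0) with hcvdef
    have hcv : colVals.length = m.length := by simp [hcvdef]
    have hcvne : colVals ≠ [] := by
      intro h; rw [h] at hcv; simp at hcv; omega
    set v := (pyRotateRight colVals k).getD i 0 with hvdef
    have h1 : (List.mapIdx (fun i row => row.set col ((pyRotateRight colVals k).getD i 0)) m).getD i [] = (m[i]).set col v := by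
      rw [List.getD_eq_getElem _ _ (by simpa using hi), List.getElem_mapIdx]
    have h2 : entM (List.mapIdx (fun i row => row.set col ((pyRotateRight colVals k).getD i 0)) m) i j
        = ((m[i]).set col v).getD j 0 := by
      unfold entM; rw [h1]
    rw [h2]
    by_cases hjc : j = col
    · subst hjc
      rw [if_pos rfl]
      rw [List.getD_eq_getElem _ _ (by rw [List.length_set, hrowi]; exact hj), List.getElem_set, if_pos rfl]
      have hq : (((i : Int) - k) % (m.length : Int)).toNat < m.length := by
        have := Int.emod_nonneg ((i : Int) - k) hn0
        have := Int.emod_lt_of_pos ((i : Int) - k) (by omega : 0 < (m.length : Int))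
        omega
      rw [hvdef, pyRotateRight_getD colVals k i hcvne (by omega), hcv]
      rw [List.getD_eq_getElem _ _ (by rw [hcv]; exact hq)]
      simp only [hcvdef, List.getElem_map, List.getElem_range]
      rfl
    · rw [if_neg hjc]
      rw [List.getD_eq_getElem _ _ (by rw [List.length_set, hrowi]; exact hj), List.getElem_set,
          if_neg (fun h => hjc h.symm)]
      unfold entM
      rw [List.getD_eq_getElem _ _ hi, List.getD_eq_getElem _ _ (by rw [hrowi]; exact hj)]

theorem sub_emod_collapse (a b n : Int) : (a - b % n) % n = (a - b) % n := by
  conv_rhs => rw [Int.sub_emod]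
  conv_lhs => rw [Int.sub_emod, Int.emod_emod_of_dvd b dvd_rfl]

theorem foldl_set_range (g : Nat → List Int → List Int) (l : List (List Int)) (m : Nat) (hm : m ≤ l.length) :
    (List.range m).foldl (fun out r => out.set r (g r (out.getD r []))) l
      = l.mapIdx (fun i x => if i < m then g i x else x) := by
  induction m with
  | zero =>
    simp only [List.range_zero, List.foldl_nil]
    apply List.ext_getElem (by simp)
    intro i hi1 hi2
    simp [List.getElem_mapIdx]
  | succ m ih =>
    have hm' : m ≤ l.length := by omega
    rw [List.range_succ, List.foldl_append, ih hm', List.foldl_cons, List.foldl_nil]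
    have hgetD : (l.mapIdx (fun i x => if i < m then g i x else x)).getD m [] = l[m]'(by omega) := by
      rw [List.getD_eq_getElem _ _ (by simp; omega), List.getElem_mapIdx, if_neg (lt_irrefl m)]
    rw [hgetD]
    apply List.ext_getElem (by simp)
    intro i hi1 hi2
    simp only [List.getElem_set, List.getElem_mapIdx]
    rcases eq_or_ne m i with rfl | hne
    · simp
    · rw [if_neg hne]
      split_ifs <;> first | rfl | omega

theorem col_fold (out1 : List (List Int)) (cs : List Int) (R C : Nat) (m : Nat)
    (hR : out1.length = R) (hrect : ∀ row ∈ out1, row.length = C) (hm : m ≤ C) (h0 : 0 < R) :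
    ((List.range m).foldl (fun out c => pyRotateDownInplace out c (if R ≠ 0 then (cs.getD c 0) % (R : Int) else 0)) out1).length = R ∧
    (∀ row ∈ (List.range m).foldl (fun out c => pyRotateDownInplace out c (if R ≠ 0 then (cs.getD c 0) % (R : Int) else 0)) out1, row.length = C) ∧
    (∀ i < R, ∀ j < C,
      entM ((List.range m).foldl (fun out c => pyRotateDownInplace out c (if R ≠ 0 then (cs.getD c 0) % (R : Int) else 0)) out1) i j =
        if j < m then entM out1 ((((i : Int) - cs.getD j 0) % (R : Int)).toNat) j else entM out1 i j) := by
  induction m with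
  | zero =>
    simp only [List.range_zero, List.foldl_nil]
    exact ⟨hR, hrect, fun i hi j hj => by rw [if_neg (by omega)]⟩
  | succ m ih =>
    obtain ⟨hL, hRect, hEnt⟩ := ih (by omega)
    set res := (List.range m).foldl (fun out c => pyRotateDownInplace out c (if R ≠ 0 then (cs.getD c 0) % (R : Int) else 0)) out1 with hres
    rw [List.range_succ, List.foldl_append, List.foldl_cons, List.foldl_nil, ← hres]
    rw [if_pos (by omega)]
    refine ⟨by rw [pyRotateDown_length, hL], ?_, ?_⟩
    · intro row hrow
      obtain ⟨idx, hidx, hrow⟩ := List.getElem_of_mem hrow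
      have hidx' : idx < res.length := by
        have := pyRotateDown_length res m ((cs.getD m 0) % (R : Int)); omega
      calc row.length = ((pyRotateDownInplace res m ((cs.getD m 0) % (R : Int))).getD idx []).length := by
              rw [List.getD_eq_getElem _ _ hidx, hrow]
        _ = ((res.getD idx []).length) := pyRotateDown_rowlen _ _ _ _
        _ = C := by rw [List.getD_eq_getElem _ _ hidx']; exact hRect _ (List.getElem_mem hidx')
    · intro i hi j hj
      rw [pyRotateDown_ent res m _ hRect (by omega) i j (by omega) hj]
      rw [hL]
      by_cases hjm : j = m
      · subst hjm
        rw [if_pos rfl, if_pos (by omega)]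
        have hq : (((i : Int) - (cs.getD j 0) % (R : Int)) % (R : Int)).toNat < R := by
          have h1 := Int.emod_nonneg ((i : Int) - (cs.getD j 0) % (R : Int)) (by exact_mod_cast h0.ne' : (R : Int) ≠ 0)
          have h2 := Int.emod_lt_of_pos ((i : Int) - (cs.getD j 0) % (R : Int)) (by exact_mod_cast h0 : (0 : Int) < R)
          omega
        rw [hEnt _ hq j hj, if_neg (lt_irrefl j), sub_emod_collapse]
      · rw [if_neg hjm]
        rw [hEnt i hi j hj]
        by_cases hjm' : j < m
        · rw [if_pos hjm', if_pos (by omega)]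
        · rw [if_neg hjm', if_neg (by omega)]

theorem entM_getElem (m : List (List Int)) (i j : Nat) (hi : i < m.length) {row : List Int}
    (hrow : row = m[i]'hi) (hj : j < row.length) : row[j]'hj = entM m i j := by
  subst hrow
  unfold entM
  rw [List.getD_eq_getElem _ _ hi, List.getD_eq_getElem _ _ hj]

theorem main_eq (mat : List (List Int)) (rs cs : List Int)
    (hrect : ∀ row ∈ mat, row.length = (mat.headD []).length)
    (hlens : (mat.headD []).length ≠ 0 → mat.length ≤ rs.length ∧ (mat.headD []).length ≤ cs.length) :
    one_set_by_values mat rs cs = one_set_by_values_alt mat rs cs := by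
  by_cases hR0 : mat.length = 0
  · have : mat = [] := List.eq_nil_of_length_eq_zero hR0
    subst this
    rfl
  · set R := mat.length with hRdef
    set C := (mat.headD []).length with hCdef
    have hCif : (if R = 0 then 0 else (mat.headD []).length) = C := by rw [if_neg hR0]
    have e1 : one_set_by_values mat rs cs
        = (List.range C).foldl (fun out c => pyRotateDownInplace out c (if R ≠ 0 then (cs.getD c 0) % (R : Int) else 0))
            ((List.range R).foldl (fun out r => out.set r (pyRotateRight (out.getD r [])
              (if C ≠ 0 then (rs.getD r 0) % (C : Int) else 0))) mat) := by
      simp only [one_set_by_values, hCif, ← hRdef, List.map_id']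
    have e2 : one_set_by_values_alt mat rs cs
        = (List.range R).map (fun (i : Nat) => (List.range C).map (fun (j : Nat) =>
            (mat.getD ((((i : Int) - cs.getD j 0) % (R : Int)).toNat) []).getD
              ((((j : Int) - rs.getD ((((i : Int) - cs.getD j 0) % (R : Int)).toNat) 0) % (C : Int)).toNat) 0)) := by
      simp only [one_set_by_values_alt, hCif, ← hRdef]
    by_cases hC0 : C = 0
    · -- empty rows: A keeps mat (every row is []), B rebuilds R empty rows
      have hrows : ∀ i (h : i < R), mat[i] = [] := by
        intro i h
        have := hrect _ (List.getElem_mem h)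
        rw [hC0] at this
        exact List.eq_nil_of_length_eq_zero this
      rw [e1, e2,
          foldl_set_range (fun r x => pyRotateRight x (if C ≠ 0 then (rs.getD r 0) % (C : Int) else 0)) mat R hRdef.le,
          hC0]
      simp only [List.range_zero, List.foldl_nil, List.map_nil]
      apply List.ext_getElem (by simp [hRdef])
      intro i hi1 hi2
      simp only [List.getElem_mapIdx, List.getElem_map]
      rw [if_pos (by simp at hi1; omega), hrows i (by simp at hi1; omega)]
      rfl
    · obtain ⟨hrs, hcs⟩ := hlens (hCdef ▸ hC0)
      have hRpos : 0 < R := by omega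
      have hCpos : 0 < C := by omega
      -- row pass
      rw [e1, foldl_set_range (fun r x => pyRotateRight x (if C ≠ 0 then (rs.getD r 0) % (C : Int) else 0)) mat R hRdef.le]
      set out1 := mat.mapIdx (fun i x => if i < R then pyRotateRight x (if C ≠ 0 then (rs.getD i 0) % (C : Int) else 0) else x) with hout1
      have hout1len : out1.length = R := by simp [hout1, hRdef]
      have hout1rect : ∀ row ∈ out1, row.length = C := by
        intro row hrow
        obtain ⟨idx, hidx, hrow⟩ := List.getElem_of_mem hrow
        rw [← hrow]
        have hidx' : idx < R := by rw [← hout1len]; exact hidx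
        simp only [hout1, List.getElem_mapIdx, if_pos hidx', pyRotateRight_length]
        exact hrect _ (List.getElem_mem (by omega))
      have hout1ent : ∀ r < R, ∀ j < C,
          entM out1 r j = entM mat r ((((j : Int) - rs.getD r 0) % (C : Int)).toNat) := by
        intro r hr j hj
        have hrl : (mat[r]'(by omega)).length = C := hrect _ (List.getElem_mem (by omega))
        have hne : mat[r]'(by omega) ≠ [] := by
          intro h; rw [h] at hrl; simp at hrl; omega
        unfold entM
        rw [List.getD_eq_getElem _ _ (by omega : r < out1.length)]
        simp only [hout1, List.getElem_mapIdx, if_pos hr, if_pos hC0]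
        rw [pyRotateRight_getD _ _ j hne (by omega), hrl, sub_emod_collapse,
            List.getD_eq_getElem _ _ (by omega : r < mat.length)]
      -- column pass
      obtain ⟨hAlen, hArect, hAent⟩ := col_fold out1 cs R C C hout1len hout1rect (le_refl C) hRpos
      rw [e2]
      apply List.ext_getElem (by rw [hAlen]; simp)
      intro i hi1 hi2
      have hiR : i < R := by omega
      apply List.ext_getElem
      · have h := hArect _ (List.getElem_mem hi1)
        rw [h]
        simp
      intro j hj1 hj2
      have hjC : j < C := by
        have := hArect _ (List.getElem_mem hi1); omega
      rw [entM_getElem _ i j hi1 rfl hj1, hAent i hiR j hjC, if_pos hjC]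
      have hp : (((i : Int) - cs.getD j 0) % (R : Int)).toNat < R := by
        have h1 := Int.emod_nonneg ((i : Int) - cs.getD j 0) (by exact_mod_cast hRpos.ne' : (R : Int) ≠ 0)
        have h2 := Int.emod_lt_of_pos ((i : Int) - cs.getD j 0) (by exact_mod_cast hRpos : (0 : Int) < R)
        omega
      rw [hout1ent _ hp j hjC]
      simp only [List.getElem_map, List.getElem_range]
      rfl

-- ===== VERDICT (by name: the statement is the Claim_ definition above) =====
theorem one_set_by_values_spec : Claim_equal_one_set_by_values := by
  intro mat row_shifts col_shifts _hdom hpre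
  unfold Spec_one_set_by_values
  exact main_eq mat row_shifts col_shifts hpre.1 hpre.2
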